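-- pv_equiv track=rewrite | github.com/biesnecker/aoc-anyhow | 202502.py | generate_invalid
-- ===== SOURCE A (Python) =====
-- def generate_invalid(max_val: int) -> dict[int, bool]:
--     invalid = dict()
--     max_digits = len(str(max_val))
--
--     for plen in range(1, max_digits + 1):
--         max_reps = max_digits // plen
--         start = max(1, 10 ** (plen - 1))
--         for reps in range(2, max_reps + 1):
--             for p in range(start, 10**plen):
--                 num = int(str(p) * reps)
--                 if num > max_val:
--                     break
--                 if num not in invalid or not invalid[num]:
--                     invalid[num] = reps == 2
--     return invalid
-- ===== SOURCE B (Python) =====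
-- def generate_invalid(max_val: int) -> dict[int, bool]:
--     max_digits = len(str(max_val))
--
--     # Phase 1: every number <= max_val that is a pattern repeated exactly twice.
--     doubles = set()
--     for plen in range(1, max_digits // 2 + 1):
--         for p in range(max(1, 10 ** (plen - 1)), 10**plen):
--             d = int(str(p) * 2)
--             if d > max_val:
--                 break
--             doubles.add(d)
--
--     # Phase 2: enumerate all repeated-pattern numbers once (first occurrence
--     # only) and read each value directly off the table: no overwrites.
--     out = {}
--     for plen in range(1, max_digits + 1):
--         for reps in range(2, max_digits // plen + 1):
--             for p in range(max(1, 10 ** (plen - 1)), 10**plen):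
--                 num = int(str(p) * reps)
--                 if num > max_val:
--                     break
--                 if num not in out:
--                     out[num] = num in doubles
--     return out
-- ===== Notes on version B (the rewrite author's own statement) =====
-- stated objective: alternative
-- what changed: A tracks a repeated-exactly-twice flag through the enumeration with 'True-wins' dict overwrites; B first builds the set of pattern-doubled numbers once, then fills the dict in a single insert-if-absent pass whose value is a plain membership test, so no entry is ever written twice.
import Mathlib
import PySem

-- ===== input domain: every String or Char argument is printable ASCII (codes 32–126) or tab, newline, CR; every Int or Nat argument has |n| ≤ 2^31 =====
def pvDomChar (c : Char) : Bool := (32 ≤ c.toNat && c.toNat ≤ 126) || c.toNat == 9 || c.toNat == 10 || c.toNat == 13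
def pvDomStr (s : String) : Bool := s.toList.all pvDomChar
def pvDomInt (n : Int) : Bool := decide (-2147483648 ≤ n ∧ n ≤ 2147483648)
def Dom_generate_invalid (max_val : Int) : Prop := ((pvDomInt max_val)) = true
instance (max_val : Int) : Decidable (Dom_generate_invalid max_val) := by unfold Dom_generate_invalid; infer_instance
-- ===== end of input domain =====

-- B replaces A's repetition-count flag tracking and "True-wins" overwrite logic by a precomputed
-- doubles table and a first-insertion-only pass (same values, same insertion order; no speedup claimed).

-- ===== PORT A =====

-- int(str(p) * reps): str(p) repeated reps times, parsed back (always a valid int here: p ≥ 1, reps ≥ 2)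
def pvRepNum (p reps : Int) : Int :=
  (PySem.Int.ofChars? (List.flatten (List.replicate reps.toNat (PySem.Int.toChars p)))).getD 0

-- A's inner 'for p in range(start, 10**plen)' with its break
def pvALoop (max_val reps : Int) (ps : List Int) (invalid : PySem.Dict Int Bool) : PySem.Dict Int Bool :=
  match ps with
  | [] => invalid
  | p :: rest =>
    let num := pvRepNum p reps
    if max_val < num then invalid
    else
      let invalid' :=
        match invalid.get? num with           -- 'num not in invalid or not invalid[num]'
        | none => invalid.insert num (decide (reps = 2))
        | some b => if !b then invalid.insert num (decide (reps = 2)) else invalid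
      pvALoop max_val reps rest invalid'

def generate_invalid (max_val : Int) : List (Int × Bool) :=
  let max_digits : Int := PySem.Str.len (PySem.Int.toStr max_val)
  let invalid :=
    (PySem.List.pyRange 1 (max_digits + 1) 1).foldl (fun invalid plen =>
      let max_reps := PySem.Int.floordiv max_digits plen
      let start := max 1 ((10 : Int) ^ (plen - 1).toNat)   -- 10**(plen-1); plen ≥ 1 in this range
      (PySem.List.pyRange 2 (max_reps + 1) 1).foldl (fun invalid reps =>
        pvALoop max_val reps (PySem.List.pyRange start ((10 : Int) ^ plen.toNat) 1) invalid) invalid)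
      (PySem.Dict.empty)
  invalid.items

-- ===== PORT B =====

-- B phase 1: 'for p in range(...): d = int(str(p)*2); break / doubles.add(d)'
def pvBDoublesLoop (max_val : Int) (ps : List Int) (doubles : PySem.Set Int) : PySem.Set Int :=
  match ps with
  | [] => doubles
  | p :: rest =>
    let d := pvRepNum p 2
    if max_val < d then doubles
    else pvBDoublesLoop max_val rest (PySem.Set.add doubles d)

-- B phase 2 inner loop: first-insertion only, value looked up in 'doubles'
def pvBOutLoop (max_val reps : Int) (doubles : PySem.Set Int) (ps : List Int)
    (out : PySem.Dict Int Bool) : PySem.Dict Int Bool :=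
  match ps with
  | [] => out
  | p :: rest =>
    let num := pvRepNum p reps
    if max_val < num then out
    else
      let out' := if out.contains num then out else out.insert num (doubles.contains num)
      pvBOutLoop max_val reps doubles rest out'

def generate_invalid_alt (max_val : Int) : List (Int × Bool) :=
  let max_digits : Int := PySem.Str.len (PySem.Int.toStr max_val)
  let doubles :=
    (PySem.List.pyRange 1 (PySem.Int.floordiv max_digits 2 + 1) 1).foldl (fun doubles plen =>
      pvBDoublesLoop max_val
        (PySem.List.pyRange (max 1 ((10 : Int) ^ (plen - 1).toNat)) ((10 : Int) ^ plen.toNat) 1)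
        doubles)
      PySem.Set.empty
  let out :=
    (PySem.List.pyRange 1 (max_digits + 1) 1).foldl (fun out plen =>
      (PySem.List.pyRange 2 (PySem.Int.floordiv max_digits plen + 1) 1).foldl (fun out reps =>
        pvBOutLoop max_val reps doubles
          (PySem.List.pyRange (max 1 ((10 : Int) ^ (plen - 1).toNat)) ((10 : Int) ^ plen.toNat) 1)
          out) out)
      PySem.Dict.empty
  out.items

-- ===== PRECONDITION & SPEC =====
def Spec_generate_invalid (max_val : Int) (out : List (Int × Bool)) : Prop := out = generate_invalid_alt max_val
instance (max_val : Int) (out : List (Int × Bool)) : Decidable (Spec_generate_invalid max_val out) := by unfold Spec_generate_invalid; infer_instance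

-- ===== CLAIM (what is proved, stated in full; the proofs are below) =====
def Claim_equal_generate_invalid : Prop := ∀ (max_val : Int), Dom_generate_invalid max_val → Spec_generate_invalid max_val (generate_invalid max_val)

-- ===== LEMMAS AND PROOFS =====

-- A's dict update as a fold step
def pvUpdA (d : PySem.Dict Int Bool) (e : Int × Bool) : PySem.Dict Int Bool :=
  match d.get? e.1 with
  | none => d.insert e.1 e.2
  | some b => if !b then d.insert e.1 e.2 else d

-- B's dict update as a fold step
def pvUpdB (S : PySem.Set Int) (d : PySem.Dict Int Bool) (k : Int) : PySem.Dict Int Bool :=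
  if d.contains k then d else d.insert k (S.contains k)

def pvMD (max_val : Int) : Int := PySem.Str.len (PySem.Int.toStr max_val)

-- the p values actually processed (the break cuts the range here)
def pvTake (max_val reps plen : Int) : List Int :=
  (PySem.List.pyRange (max 1 ((10 : Int) ^ (plen - 1).toNat)) ((10 : Int) ^ plen.toNat) 1).takeWhile
    (fun p => !decide (max_val < pvRepNum p reps))

-- the full (num, reps == 2) entry stream of A's triple loop
def pvEL (max_val : Int) : List (Int × Bool) :=
  (PySem.List.pyRange 1 (pvMD max_val + 1) 1).flatMap (fun plen =>
    (PySem.List.pyRange 2 (PySem.Int.floordiv (pvMD max_val) plen + 1) 1).flatMap (fun reps =>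
      (pvTake max_val reps plen).map (fun p => (pvRepNum p reps, decide (reps = 2)))))

-- the stream of B's doubles phase
def pvDL (max_val : Int) : List Int :=
  (PySem.List.pyRange 1 (PySem.Int.floordiv (pvMD max_val) 2 + 1) 1).flatMap (fun plen =>
    (pvTake max_val 2 plen).map (fun p => pvRepNum p 2))

lemma pvALoop_eq (max_val reps : Int) (ps : List Int) (d : PySem.Dict Int Bool) :
    pvALoop max_val reps ps d =
      ((ps.takeWhile (fun p => !decide (max_val < pvRepNum p reps))).map
        (fun p => (pvRepNum p reps, decide (reps = 2)))).foldl pvUpdA d := by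
  induction ps generalizing d with
  | nil => simp [pvALoop]
  | cons p rest ih =>
    by_cases h : max_val < pvRepNum p reps
    · simp [pvALoop, h]
    · simp only [pvALoop, List.takeWhile_cons, h]
      rw [ih]
      rfl


lemma pvBOutLoop_eq (max_val reps : Int) (S : PySem.Set Int) (ps : List Int) (d : PySem.Dict Int Bool) :
    pvBOutLoop max_val reps S ps d =
      ((ps.takeWhile (fun p => !decide (max_val < pvRepNum p reps))).map
        (fun p => pvRepNum p reps)).foldl (pvUpdB S) d := by
  induction ps generalizing d with
  | nil => simp [pvBOutLoop]
  | cons p rest ih =>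
    by_cases h : max_val < pvRepNum p reps
    · simp [pvBOutLoop, h]
    · simp only [pvBOutLoop, List.takeWhile_cons, h]
      rw [ih]
      rfl

lemma pvBDoublesLoop_eq (max_val : Int) (ps : List Int) (S : PySem.Set Int) :
    pvBDoublesLoop max_val ps S =
      ((ps.takeWhile (fun p => !decide (max_val < pvRepNum p 2))).map
        (fun p => pvRepNum p 2)).foldl PySem.Set.add S := by
  induction ps generalizing S with
  | nil => simp [pvBDoublesLoop]
  | cons p rest ih =>
    by_cases h : max_val < pvRepNum p 2
    · simp [pvBDoublesLoop, h]
    · simp [pvBDoublesLoop, h, ih]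

lemma pvGetMkMap (ks : List Int) (v : Int → Bool) (n : Int) :
    (PySem.Dict.mk (ks.map (fun k => (k, v k)))).get? n = if n ∈ ks then some (v n) else none := by
  induction ks with
  | nil => simp [show (PySem.Dict.mk ([] : List (Int × Bool))) = PySem.Dict.empty from rfl]
  | cons k ks ih =>
    simp only [List.map_cons, PySem.Dict.get?_mk_cons, ih]
    by_cases h : k = n
    · simp [h]
    · simp [h, Ne.symm h]

lemma pvContainsMkMap (ks : List Int) (v : Int → Bool) (n : Int) :
    (PySem.Dict.mk (ks.map (fun k => (k, v k)))).contains n = decide (n ∈ ks) := by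
  rw [PySem.Dict.contains_eq_isSome_get?, pvGetMkMap]
  by_cases h : n ∈ ks <;> simp [h]


-- A's fold computes: first-occurrence keys, value = "some entry (k, true) occurs anywhere so far"
lemma pvCharA (L : List (Int × Bool)) :
    L.foldl pvUpdA PySem.Dict.empty =
      PySem.Dict.mk ((PySem.Set.ofList (L.map Prod.fst)).map
        (fun k => (k, decide ((k, true) ∈ L)))) := by
  induction L using List.reverseRecOn with
  | nil => rfl
  | append_singleton L e ih =>
    obtain ⟨n, f⟩ := e
    rw [List.foldl_append, List.foldl_cons, List.foldl_nil, ih, List.map_append,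
      List.map_cons, List.map_nil, PySem.Set.ofList_append_singleton]
    unfold pvUpdA
    dsimp only
    rw [pvGetMkMap]
    by_cases hn : n ∈ List.map Prod.fst L
    · have hmem : n ∈ PySem.Set.ofList (List.map Prod.fst L) :=
        (PySem.Set.mem_ofList _ n).mpr hn
      rw [if_pos hmem, PySem.Set.add_of_mem hmem]
      by_cases hv : (n, true) ∈ L
      · -- value already true: A keeps the dict; values unchanged pointwise
        rw [decide_eq_true hv]
        simp only [Bool.not_true, Bool.false_eq_true, if_false]
        congr 1
        apply List.map_congr_left
        intro k hk
        by_cases hkn : k = n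
        · subst hkn; simp [hv]
        · have h1 : ((k, true) ∈ L ++ [(n, f)]) ↔ (k, true) ∈ L := by
            simp [Prod.ext_iff, hkn]
          simp [h1]
      · -- value false: A overwrites in place
        rw [decide_eq_false hv]
        simp only [Bool.not_false, if_true]
        apply PySem.Dict.ext
        rw [PySem.Dict.items_insert_of_contains _ _ (by rw [pvContainsMkMap, decide_eq_true hmem])]
        rw [List.map_map]
        apply List.map_congr_left
        intro k hk
        by_cases hkn : k = n
        · subst hkn
          have : ((k, true) ∈ L ++ [(k, f)]) ↔ f = true := by
            simp [hv, eq_comm]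
          simp [this]
        · have h1 : ((k, true) ∈ L ++ [(n, f)]) ↔ (k, true) ∈ L := by
            simp [Prod.ext_iff, hkn]
          simp [Function.comp, hkn, h1]
    · have hmem : n ∉ PySem.Set.ofList (List.map Prod.fst L) :=
        fun h => hn ((PySem.Set.mem_ofList _ n).mp h)
      rw [if_neg hmem, PySem.Set.add_of_not_mem hmem]
      apply PySem.Dict.ext
      rw [PySem.Dict.items_insert_of_not_contains _ _
        (by rw [pvContainsMkMap, decide_eq_false hmem])]
      rw [List.map_append, List.map_cons, List.map_nil]
      congr 1
      · apply List.map_congr_left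
        intro k hk
        have hkn : k ≠ n := fun h => hn (h ▸ ((PySem.Set.mem_ofList _ k).mp hk))
        have h1 : ((k, true) ∈ L ++ [(n, f)]) ↔ (k, true) ∈ L := by
          simp [Prod.ext_iff, hkn]
        simp [h1]
      · have hv : (n, true) ∉ L := fun h => hn (List.mem_map_of_mem h)
        have : ((n, true) ∈ L ++ [(n, f)]) ↔ f = true := by simp [hv, eq_comm]
        simp [this]


-- B's fold computes: first-occurrence keys, value = membership in the fixed set S
lemma pvCharB (S : PySem.Set Int) (ks : List Int) :
    ks.foldl (pvUpdB S) PySem.Dict.empty =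
      PySem.Dict.mk ((PySem.Set.ofList ks).map (fun k => (k, S.contains k))) := by
  induction ks using List.reverseRecOn with
  | nil => rfl
  | append_singleton ks n ih =>
    rw [List.foldl_append, List.foldl_cons, List.foldl_nil, ih, PySem.Set.ofList_append_singleton]
    unfold pvUpdB
    rw [pvContainsMkMap]
    by_cases hn : n ∈ PySem.Set.ofList ks
    · have hn' : n ∈ ks := (PySem.Set.mem_ofList ks n).mp hn
      rw [PySem.Set.add_of_mem hn]
      simp [hn']
    · have hn' : n ∉ ks := fun h => hn ((PySem.Set.mem_ofList ks n).mpr h)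
      rw [PySem.Set.add_of_not_mem hn]
      rw [decide_eq_false hn]
      simp only [Bool.false_eq_true, if_false]
      apply PySem.Dict.ext
      rw [PySem.Dict.items_insert_of_not_contains _ _ (by rw [pvContainsMkMap, decide_eq_false hn])]
      simp


lemma pvMem_DL_iff (max_val x : Int) : x ∈ pvDL max_val ↔ (x, true) ∈ pvEL max_val := by
  unfold pvDL pvEL
  simp only [List.mem_flatMap, List.mem_map, PySem.List.mem_pyRange_one, Prod.mk.injEq,
    decide_eq_true_eq]
  constructor
  · rintro ⟨plen, ⟨h1, h2⟩, p, hp, hx⟩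
    have hb : plen ≤ PySem.Int.floordiv (pvMD max_val) 2 := by omega
    have hplen : plen * 2 ≤ pvMD max_val :=
      (PySem.Int.le_floordiv_iff_mul_le (by norm_num)).mp hb
    have h2' : 2 ≤ PySem.Int.floordiv (pvMD max_val) plen :=
      (PySem.Int.le_floordiv_iff_mul_le (by omega)).mpr (by omega)
    exact ⟨plen, ⟨h1, by omega⟩, 2, ⟨by omega, by omega⟩, p, hp, hx, rfl⟩
  · rintro ⟨plen, ⟨h1, _⟩, reps, ⟨hr1, hr2⟩, p, hp, hx, hreps⟩
    subst hreps
    have h2' : 2 * plen ≤ pvMD max_val :=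
      (PySem.Int.le_floordiv_iff_mul_le (by omega)).mp (by omega)
    have hb : plen ≤ PySem.Int.floordiv (pvMD max_val) 2 :=
      (PySem.Int.le_floordiv_iff_mul_le (by norm_num)).mpr (by omega)
    exact ⟨plen, ⟨h1, by omega⟩, p, hp, hx⟩

lemma pvA_eq (max_val : Int) :
    generate_invalid max_val = ((pvEL max_val).foldl pvUpdA PySem.Dict.empty).items := by
  simp only [generate_invalid, pvALoop_eq, pvEL, pvTake, pvMD, List.foldl_flatMap]

lemma pvB_eq (max_val : Int) :
    generate_invalid_alt max_val =
      (((pvEL max_val).map Prod.fst).foldl (pvUpdB (PySem.Set.ofList (pvDL max_val)))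
        PySem.Dict.empty).items := by
  simp only [generate_invalid_alt, pvBOutLoop_eq, pvBDoublesLoop_eq, pvEL, pvDL, pvTake, pvMD,
    List.map_flatMap, List.map_map, List.foldl_flatMap]
  rw [PySem.Set.ofList_eq_foldl]
  simp only [List.foldl_flatMap, List.foldl_map]
  dsimp only [Function.comp_apply, PySem.Set.empty]

-- ===== VERDICT (by name: the statement is the Claim_ definition above) =====
theorem generate_invalid_spec : Claim_equal_generate_invalid := by
  intro max_val _
  unfold Spec_generate_invalid
  rw [pvA_eq, pvB_eq, pvCharA, pvCharB]
  refine congrArg PySem.Dict.items (congrArg PySem.Dict.mk (List.map_congr_left ?_))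
  intro k hk
  have hv : (decide ((k, true) ∈ pvEL max_val)) =
      PySem.Set.contains (PySem.Set.ofList (pvDL max_val)) k := by
    rw [Bool.eq_iff_iff, decide_eq_true_iff, PySem.Set.contains_iff, PySem.Set.mem_ofList,
      pvMem_DL_iff]
  rw [hv]
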